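-- pv_equiv track=rewrite | github.com/GerlinGreen/OneIE | preprocessing/process_dygiepp.py | map_index
-- ===== SOURCE A (Python) =====
-- def map_index(pieces):
--     idxs = []
--     for i, piece in enumerate(pieces):
--         if i == 0:
--             idxs.append([0, len(piece)])
--         else:
--             _, last = idxs[-1]
--             idxs.append([last, last + len(piece)])
--     return idxs
-- ===== SOURCE B (Python) =====
-- def map_index(pieces):
--     lens = [len(p) for p in pieces]
--     return [[sum(lens[:i]), sum(lens[:i + 1])] for i in range(len(lens))]
-- ===== Notes on version B (the rewrite author's own statement) =====
-- stated objective: simpler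
-- what changed: B has no accumulator at all: it recomputes each boundary independently as the sum of the lengths of the preceding pieces (sum over a prefix slice), instead of threading the previous end through a stateful left-to-right pass.
import Mathlib
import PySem

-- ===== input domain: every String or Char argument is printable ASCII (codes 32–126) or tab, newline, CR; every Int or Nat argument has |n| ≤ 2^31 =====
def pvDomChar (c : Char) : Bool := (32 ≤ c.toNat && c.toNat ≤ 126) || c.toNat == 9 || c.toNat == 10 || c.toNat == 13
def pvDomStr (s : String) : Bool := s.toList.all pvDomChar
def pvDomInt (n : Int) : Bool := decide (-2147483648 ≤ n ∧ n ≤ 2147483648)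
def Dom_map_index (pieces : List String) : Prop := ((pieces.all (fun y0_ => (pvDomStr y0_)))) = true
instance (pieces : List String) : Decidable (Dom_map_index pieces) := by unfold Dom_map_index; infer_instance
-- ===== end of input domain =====

-- B is stateless: each boundary is recomputed as the sum of the preceding piece lengths (simpler, but quadratic).

-- ===== PORT A =====
def map_index (pieces : List String) : List (List Int) :=
  (PySem.List.enumerate pieces).foldl
    (fun (idxs : List (List Int)) (ip : Int × String) =>
      if ip.1 == 0 then
        idxs ++ [[0, PySem.Str.len ip.2]]
      else
        match PySem.List.pyGet? idxs (-1) with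
        | some [_, last] => idxs ++ [[last, last + PySem.Str.len ip.2]]
        | _ => idxs)   -- unreachable: idxs[-1] always exists and has two entries when i ≠ 0
    []

-- ===== PORT B =====
def map_index_alt (pieces : List String) : List (List Int) :=
  let lens := pieces.map PySem.Str.len
  (PySem.List.pyRange 0 lens.length 1).map
    (fun i => [(PySem.List.slice lens none (some i)).sum,
               (PySem.List.slice lens none (some (i + 1))).sum])

-- ===== PRECONDITION & SPEC =====
def Spec_map_index (pieces : List String) (out : List (List Int)) : Prop := out = map_index_alt pieces
instance (pieces : List String) (out : List (List Int)) : Decidable (Spec_map_index pieces out) := by unfold Spec_map_index; infer_instance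

-- ===== CLAIM (what is proved, stated in full; the proofs are below) =====
def Claim_equal_map_index : Prop := ∀ (pieces : List String), Dom_map_index pieces → Spec_map_index pieces (map_index pieces)

-- ===== LEMMAS AND PROOFS =====

-- reference function: the list of [start, end] ranges starting at offset s
def pvGo (s : Int) : List String → List (List Int)
  | [] => []
  | p :: ps => [s, s + PySem.Str.len p] :: pvGo (s + PySem.Str.len p) ps

lemma foldA (ps : List String) : ∀ (acc : List (List Int)) (k : Nat) (a s : Int),
    1 ≤ k → PySem.List.pyGet? acc (-1) = some [a, s] →
    (PySem.List.enumerate ps (k : Int)).foldl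
      (fun (idxs : List (List Int)) (ip : Int × String) =>
        if ip.1 == 0 then
          idxs ++ [[0, PySem.Str.len ip.2]]
        else
          match PySem.List.pyGet? idxs (-1) with
          | some [_, last] => idxs ++ [[last, last + PySem.Str.len ip.2]]
          | _ => idxs)
      acc = acc ++ pvGo s ps := by
  induction ps with
  | nil => intro acc k a s hk h; simp [PySem.List.enumerate_nil, pvGo]
  | cons p ps ih =>
    intro acc k a s hk h
    rw [PySem.List.enumerate_cons, List.foldl_cons]
    have hk0 : ((k : Int) == 0) = false := by simp; omega
    simp only [hk0, Bool.false_eq_true, if_false, h]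
    have : ((k : Int) + 1) = ((k + 1 : Nat) : Int) := by push_cast; ring
    rw [this, ih (acc ++ [[s, s + PySem.Str.len p]]) (k + 1) s (s + PySem.Str.len p)
      (by omega) (PySem.List.pyGet?_neg_one_append_singleton acc [s, s + PySem.Str.len p])]
    simp [pvGo]

lemma aEq (ps : List String) : map_index ps = pvGo 0 ps := by
  cases ps with
  | nil => simp [map_index, PySem.List.enumerate_nil, pvGo]
  | cons p ps =>
    show (PySem.List.enumerate (p :: ps)).foldl _ [] = _
    rw [PySem.List.enumerate_cons, List.foldl_cons]
    simp only [beq_self_eq_true, if_true, List.nil_append]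
    have h1 : ((0 : Int) + 1) = ((1 : Nat) : Int) := by norm_num
    rw [h1, foldA ps [[0, PySem.Str.len p]] 1 0 (PySem.Str.len p) (by omega)
      (by simp [PySem.List.pyGet?_neg_one])]
    simp [pvGo]

-- characterisation of pvGo by prefix sums of the piece lengths
lemma goChar (ps : List String) : ∀ (s : Int),
    pvGo s ps = (List.range ps.length).map
      (fun k => [s + ((ps.map PySem.Str.len).take k).sum,
                 s + ((ps.map PySem.Str.len).take (k + 1)).sum]) := by
  induction ps with
  | nil => intro s; simp [pvGo]
  | cons p ps ih =>
    intro s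
    rw [List.length_cons, List.range_succ_eq_map, List.map_cons, List.map_map]
    simp only [pvGo, List.map_cons, List.take_succ_cons, List.take_zero, List.sum_cons,
      List.sum_nil, add_zero]
    refine congrArg₂ _ rfl ?_
    rw [ih (s + PySem.Str.len p)]
    apply List.map_congr_left
    intro k _
    simp only [Function.comp_apply, List.take_succ_cons, List.sum_cons]
    simp [Nat.succ_eq_add_one, add_assoc]

lemma altEq (ps : List String) : map_index_alt ps = pvGo 0 ps := by
  unfold map_index_alt
  rw [goChar ps 0]
  simp only [List.length_map, PySem.List.pyRange_zero_nat, List.map_map]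
  apply List.map_congr_left
  intro k _
  simp only [Function.comp_apply, PySem.List.slice_to_natCast, zero_add]
  rw [show ((k : Int) + 1) = ((k + 1 : Nat) : Int) from by push_cast; ring,
    PySem.List.slice_to_natCast]

-- ===== VERDICT (by name: the statement is the Claim_ definition above) =====
theorem map_index_spec : Claim_equal_map_index := by
  intro pieces _
  unfold Spec_map_index
  rw [aEq, altEq]
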